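-- pv_equiv track=rewrite | github.com/eoe789/Sentimental-Analysis-Model | LouvainKeywordCommunities.py | keyword_in_document
-- ===== SOURCE A (Python) =====
-- from typing import Dict, Iterable, List, Sequence, Set
--
-- def keyword_in_document(keyword: str, tokens: List[str]) -> bool:
--     parts = [part for part in keyword.lower().split() if part]
--     if not parts:
--         return False
--     if len(parts) == 1:
--         return parts[0] in tokens
--     span = len(parts)
--     for i in range(len(tokens) - span + 1):
--         if tokens[i : i + span] == parts:
--             return True
--     return False
-- ===== SOURCE B (Python) =====
-- def keyword_in_document(keyword, tokens):
--     # Prefix-automaton simulation (Shift-And style): one left-to-right pass over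
--     # tokens maintaining the set of pattern-prefix lengths matched so far;
--     # no window slicing, no re-scanning of earlier tokens.
--     parts = keyword.lower().split()
--     if not parts:
--         return False
--     n = len(parts)
--     active = []  # lengths j (1 <= j < n): the last j tokens equal parts[:j]
--     for tok in tokens:
--         nxt = []
--         for j in active:
--             if parts[j] == tok:
--                 if j + 1 == n:
--                     return True
--                 nxt.append(j + 1)
--         if parts[0] == tok:
--             if n == 1:
--                 return True
--             nxt.append(1)
--         active = nxt
--     return False
-- ===== Notes on version B (the rewrite author's own statement) =====
-- stated objective: alternative
-- what changed: Replaces A's per-position sliding-window slice comparison (with a separate membership branch for one-word keywords) by a single left-to-right pass simulating the pattern-prefix automaton: it maintains the set of prefix lengths of the keyword currently matched and never revisits earlier tokens or builds slices.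
import Mathlib
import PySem

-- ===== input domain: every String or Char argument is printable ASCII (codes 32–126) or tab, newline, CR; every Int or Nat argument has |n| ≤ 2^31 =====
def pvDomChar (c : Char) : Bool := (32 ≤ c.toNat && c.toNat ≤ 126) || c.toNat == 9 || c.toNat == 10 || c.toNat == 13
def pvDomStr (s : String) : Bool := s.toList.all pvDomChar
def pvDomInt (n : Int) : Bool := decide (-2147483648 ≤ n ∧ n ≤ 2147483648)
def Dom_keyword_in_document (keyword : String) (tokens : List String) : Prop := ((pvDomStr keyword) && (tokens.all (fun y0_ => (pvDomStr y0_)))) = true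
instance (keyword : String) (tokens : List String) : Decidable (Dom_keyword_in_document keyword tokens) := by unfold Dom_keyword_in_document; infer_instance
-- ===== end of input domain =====

-- B replaces A's sliding-window slice comparison by a single pass simulating the
-- pattern-prefix automaton (set of currently matched prefix lengths); objective: alternative.

-- ===== PORT A =====
def keyword_in_document (keyword : String) (tokens : List String) : Bool :=
  let parts := (PySem.Str.split₀ (PySem.Str.lower keyword)).filter (fun part => !(part == ""))
  if parts.isEmpty then false
  else if parts.length == 1 then tokens.contains (parts.getD 0 "")
  else
    let span : Int := parts.length
    (PySem.List.pyRange 0 ((tokens.length : Int) - span + 1) 1).any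
      (fun i => PySem.List.slice tokens (some i) (some (i + span)) == parts)

-- ===== PORT B =====
-- inner 'for j in active' loop of Source B; 'none' signals the early 'return True'
def pvInner (parts : List String) (n : Nat) (tok : String) : List Nat → List Nat → Option (List Nat)
  | [], nxt => some nxt
  | j :: rest, nxt =>
      if parts.getD j "" == tok then
        if j + 1 == n then none
        else pvInner parts n tok rest (nxt ++ [j + 1])
      else pvInner parts n tok rest nxt

-- outer 'for tok in tokens' loop of Source B
def pvLoop (parts : List String) (n : Nat) : List String → List Nat → Bool
  | [], _ => false
  | tok :: rest, active =>
      match pvInner parts n tok active [] with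
      | none => true
      | some nxt =>
          if parts.getD 0 "" == tok then
            if n == 1 then true
            else pvLoop parts n rest (nxt ++ [1])
          else pvLoop parts n rest nxt

def keyword_in_document_alt (keyword : String) (tokens : List String) : Bool :=
  let parts := PySem.Str.split₀ (PySem.Str.lower keyword)
  if parts.isEmpty then false
  else pvLoop parts parts.length tokens []

-- ===== PRECONDITION & SPEC =====
def Spec_keyword_in_document (keyword : String) (tokens : List String) (out : Bool) : Prop := out = keyword_in_document_alt keyword tokens
instance (keyword : String) (tokens : List String) (out : Bool) : Decidable (Spec_keyword_in_document keyword tokens out) := by unfold Spec_keyword_in_document; infer_instance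

-- ===== CLAIM (what is proved, stated in full; the proofs are below) =====
def Claim_equal_keyword_in_document : Prop := ∀ (keyword : String) (tokens : List String), Dom_keyword_in_document keyword tokens → Spec_keyword_in_document keyword tokens (keyword_in_document keyword tokens)

-- ===== LEMMAS AND PROOFS =====

-- the pieces produced by str.split() are never empty
lemma pvSplitGo_ne_nil (s : List Char) : ∀ (cur : List Char) (acc : List (List Char)),
    (∀ p ∈ acc, p ≠ []) → ∀ p ∈ PySem.Chars.split₀.go s cur acc, p ≠ [] := by
  induction s with
  | nil =>
      intro cur acc hacc p hp
      by_cases hc : cur.isEmpty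
      · simp [PySem.Chars.split₀.go, hc] at hp
        exact hacc p hp
      · simp [PySem.Chars.split₀.go, hc] at hp
        rcases hp with hp | rfl
        · exact hacc p hp
        · simpa using (by simpa [List.isEmpty_iff] using hc : cur ≠ [])
  | cons c rest ih =>
      intro cur acc hacc p hp
      by_cases hs : PySem.Chars.isspace c
      · by_cases hc : cur.isEmpty
        · simp [PySem.Chars.split₀.go, hs, hc] at hp
          exact ih [] acc hacc p hp
        · simp [PySem.Chars.split₀.go, hs, hc] at hp
          refine ih [] (cur.reverse :: acc) ?_ p hp
          intro q hq
          rcases List.mem_cons.mp hq with rfl | hq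
          · simpa using (by simpa [List.isEmpty_iff] using hc : cur ≠ [])
          · exact hacc q hq
      · simp [PySem.Chars.split₀.go, hs] at hp
        exact ih (c :: cur) acc hacc p hp

lemma pvSplit_ne_empty (s : String) : ∀ p ∈ PySem.Str.split₀ s, p ≠ "" := by
  intro p hp
  simp [PySem.Str.split₀] at hp
  rcases hp with ⟨q, hq, rfl⟩
  have hq' : q ≠ [] := pvSplitGo_ne_nil _ [] [] (by simp) q hq
  intro h
  apply hq'
  have := congrArg String.toList h
  simpa using this

lemma pvFilter_id (s : String) :
    (PySem.Str.split₀ s).filter (fun part => !(part == "")) = PySem.Str.split₀ s := by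
  apply List.filter_eq_self.mpr
  intro p hp
  simpa using pvSplit_ne_empty s p hp

-- a window match characterised pointwise
lemma pvWindow_iff (tokens parts : List String) (i : Nat) (hp : parts ≠ []) :
    (tokens.drop i).take parts.length = parts ↔
      (i + parts.length ≤ tokens.length ∧
        ∀ j < parts.length, tokens.getD (i + j) "" = parts.getD j "") := by
  have hn : 0 < parts.length := List.length_pos_iff.mpr hp
  constructor
  · intro h
    have hlen := congrArg List.length h
    simp [List.length_take, List.length_drop] at hlen
    have hbound : i + parts.length ≤ tokens.length := by omega
    refine ⟨hbound, ?_⟩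
    intro j hj
    have hij : i + j < tokens.length := by omega
    have hjt : j < ((tokens.drop i).take parts.length).length := by
      simp [List.length_take, List.length_drop]; omega
    have := List.getElem_of_eq h hjt
    rw [List.getElem_take, List.getElem_drop] at this
    rw [List.getD_eq_getElem tokens "" hij, List.getD_eq_getElem parts "" hj, ← this]
  · rintro ⟨hbound, h⟩
    apply List.ext_getElem
    · simp [List.length_take, List.length_drop]; omega
    · intro j hj1 hj2
      rw [List.getElem_take, List.getElem_drop]
      have hij : i + j < tokens.length := by omega
      have := h j hj2
      rw [List.getD_eq_getElem tokens "" hij, List.getD_eq_getElem parts "" hj2] at this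
      exact this

-- "the last j tokens of tokens.take i equal parts.take j", stated pointwise
def pvM (tokens parts : List String) (i j : Nat) : Prop :=
  j ≤ i ∧ ∀ l < j, tokens.getD (i - j + l) "" = parts.getD l ""

lemma pvInner_eq (parts : List String) (n : Nat) (tok : String) :
    ∀ (active nxt : List Nat),
      pvInner parts n tok active nxt =
        if active.any (fun j => parts.getD j "" == tok && j + 1 == n) then none
        else some (nxt ++ (active.filter (fun j => parts.getD j "" == tok)).map (· + 1)) := by
  intro active
  induction active with
  | nil => intro nxt; simp [pvInner]
  | cons j rest ih =>
      intro nxt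
      simp only [pvInner]
      by_cases hm : (parts.getD j "" == tok) = true
      · by_cases he : (j + 1 == n) = true
        · rw [if_pos hm, if_pos he, List.any_cons, hm, he]
          simp
        · have he' : (j + 1 == n) = false := by simpa using he
          rw [if_pos hm, if_neg he, ih, List.any_cons, hm, he', List.filter_cons, hm]
          simp
      · have hm' : (parts.getD j "" == tok) = false := by simpa using hm
        rw [if_neg hm, ih, List.any_cons, hm', List.filter_cons, hm']
        simp

lemma pvA_single_iff (tokens : List String) (p : String) :
    tokens.contains p = true ↔ ∃ k, (tokens.drop k).take 1 = [p] := by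
  rw [List.contains_iff_mem, List.mem_iff_getElem]
  constructor
  · rintro ⟨k, hk, hke⟩
    refine ⟨k, ?_⟩
    rw [List.drop_eq_getElem_cons hk]
    simp [hke]
  · rintro ⟨k, hk⟩
    have hk' : k < tokens.length := by
      by_contra h
      rw [List.drop_eq_nil_of_le (by omega)] at hk
      simp at hk
    refine ⟨k, hk', ?_⟩
    rw [List.drop_eq_getElem_cons hk'] at hk
    simp only [List.take_succ_cons, List.take_zero, List.cons.injEq, and_true] at hk
    exact hk

lemma pvA_range_iff (tokens parts : List String) (hp : parts ≠ []) :
    ((PySem.List.pyRange 0 ((tokens.length : Int) - (parts.length : Int) + 1) 1).any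
      (fun i => PySem.List.slice tokens (some i) (some (i + (parts.length : Int))) == parts)) = true ↔
      ∃ k, (tokens.drop k).take parts.length = parts := by
  have hn : 0 < parts.length := List.length_pos_iff.mpr hp
  rw [PySem.List.pyRange_one]
  simp only [List.any_map, List.any_eq_true, List.mem_range, Function.comp, sub_zero]
  constructor
  · rintro ⟨k, hk, hsl⟩
    refine ⟨k, ?_⟩
    have : (0 : Int) + (k : Int) = (k : Int) := by ring
    rw [this] at hsl
    rw [PySem.List.slice_natCast_add tokens k parts.length] at hsl
    exact beq_iff_eq.mp hsl
  · rintro ⟨k, hw⟩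
    have hb := (pvWindow_iff tokens parts k hp).mp hw |>.1
    refine ⟨k, ?_, ?_⟩
    · have : ((tokens.length : Int) - (parts.length : Int) + 1).toNat
          = tokens.length - parts.length + 1 := by omega
      rw [this]; omega
    · have h0 : (0 : Int) + (k : Int) = (k : Int) := by ring
      rw [h0, PySem.List.slice_natCast_add tokens k parts.length]
      exact beq_iff_eq.mpr hw

-- the loop invariant: pvLoop on the remaining tokens finds exactly the windows ending after i
lemma pvLoop_iff (tokens parts : List String) (hp : parts ≠ []) :
    ∀ fuel i (active : List Nat), tokens.length - i ≤ fuel → i ≤ tokens.length →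
      (∀ j, j ∈ active ↔ 1 ≤ j ∧ j < parts.length ∧ pvM tokens parts i j) →
      (pvLoop parts parts.length (tokens.drop i) active = true ↔
        ∃ k, i < k + parts.length ∧ (tokens.drop k).take parts.length = parts) := by
  have hn : 0 < parts.length := List.length_pos_iff.mpr hp
  set n := parts.length with hnn
  intro fuel
  induction fuel with
  | zero =>
      intro i active hf hi hinv
      have : i = tokens.length := by omega
      subst this
      rw [List.drop_length]
      simp only [pvLoop, Bool.false_eq_true, false_iff]
      rintro ⟨k, hk, hw⟩
      have := (pvWindow_iff tokens parts k hp).mp hw |>.1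
      omega
  | succ fuel ih =>
      intro i active hf hi hinv
      rcases Nat.eq_or_lt_of_le hi with rfl | hlt
      · rw [List.drop_length]
        simp only [pvLoop, Bool.false_eq_true, false_iff]
        rintro ⟨k, hk, hw⟩
        have := (pvWindow_iff tokens parts k hp).mp hw |>.1
        omega
      · have hdrop := List.drop_eq_getElem_cons hlt
        set tok := tokens[i] with htok
        have htokD : tokens.getD i "" = tok := List.getD_eq_getElem tokens "" hlt
        rw [hdrop]
        simp only [pvLoop, pvInner_eq]
        by_cases hany : (active.any (fun j => parts.getD j "" == tok && j + 1 == n)) = true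
        · -- a full match completes at position i
          simp only [hany, if_true]
          simp only [true_iff]
          rcases List.any_eq_true.mp hany with ⟨j, hjmem, hj⟩
          have hj1 : (parts.getD j "" == tok) = true ∧ (j + 1 == n) = true :=
            (Bool.and_eq_true _ _) ▸ hj
          have hjn : j + 1 = n := by simpa using hj1.2
          have hjmatch : parts.getD j "" = tok := by simpa using hj1.1
          obtain ⟨hj1', hjlt, hjle, hM⟩ :
              1 ≤ j ∧ j < n ∧ j ≤ i ∧ ∀ l < j, tokens.getD (i - j + l) "" = parts.getD l "" := by
            have := (hinv j).mp hjmem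
            exact ⟨this.1, this.2.1, this.2.2.1, this.2.2.2⟩
          refine ⟨i + 1 - n, by omega, (pvWindow_iff tokens parts (i + 1 - n) hp).mpr ⟨by omega, ?_⟩⟩
          intro l hl
          by_cases hln : l = n - 1
          · subst hln
            have : i + 1 - n + (n - 1) = i := by omega
            rw [this, htokD, ← hjmatch]
            congr 1
            omega
          · have : i + 1 - n + l = i - j + l := by omega
            rw [this]
            exact hM l (by omega)
        · -- no full match at i: either return via the n=1 branch or recurse
          have hanyF : (active.any fun j => parts.getD j "" == tok && j + 1 == n) = false := by
            simpa using hany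
          simp only [hanyF, Bool.false_eq_true, if_false, List.nil_append]
          have hnomatch' : ∀ j ∈ active, ¬(parts.getD j "" = tok ∧ j + 1 = n) := by
            intro j hj hc
            apply hany
            exact List.any_eq_true.mpr ⟨j, hj,
              (Bool.and_eq_true _ _).symm ▸ ⟨beq_iff_eq.mpr hc.1, beq_iff_eq.mpr hc.2⟩⟩
          by_cases h0 : (parts.getD 0 "" == tok) = true
          · have h0' : parts.getD 0 "" = tok := by simpa using h0
            by_cases h1 : (n == 1) = true
            · have h1' : n = 1 := by simpa using h1
              simp only [h0, h1, if_true, true_iff]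
              refine ⟨i, by omega, (pvWindow_iff tokens parts i hp).mpr ⟨by omega, ?_⟩⟩
              intro l hl
              have : l = 0 := by omega
              subst this
              rw [Nat.add_zero, htokD]
              exact h0'.symm
            · have h1' : n ≠ 1 := by simpa using h1
              simp only [h0, h1, if_true, Bool.false_eq_true, if_false]
              rw [ih (i + 1) _ (by omega) (by omega) ?_]
              · constructor
                · rintro ⟨k, hk, hw⟩; exact ⟨k, by omega, hw⟩
                · rintro ⟨k, hk, hw⟩
                  refine ⟨k, ?_, hw⟩
                  rcases Nat.lt_or_ge (i + 1) (k + n) with h | h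
                  · exact h
                  · exfalso
                    have hke : k + n = i + 1 := by omega
                    obtain ⟨hb, hpt⟩ := (pvWindow_iff tokens parts k hp).mp hw
                    have hn2 : 2 ≤ n := by omega
                    apply hnomatch' (n - 1) ?_ ⟨?_, by omega⟩
                    · apply (hinv (n - 1)).mpr
                      refine ⟨by omega, by omega, by omega, ?_⟩
                      intro l hl
                      have : i - (n - 1) + l = k + l := by omega
                      rw [this]
                      exact hpt l (by omega)
                    · have := hpt (n - 1) (by omega)
                      have heq : k + (n - 1) = i := by omega
                      rw [heq, htokD] at this
                      exact this.symm
              · -- invariant at i+1 for nxt ++ [1]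
                intro j'
                constructor
                · intro hj'
                  rcases List.mem_append.mp hj' with hj' | hj'
                  · simp only [List.mem_map, List.mem_filter] at hj'
                    rcases hj' with ⟨j, ⟨hjmem, hjm⟩, rfl⟩
                    have hjm' : parts.getD j "" = tok := by simpa using hjm
                    obtain ⟨hj1', hjlt, hjle, hM⟩ :
                        1 ≤ j ∧ j < n ∧ j ≤ i ∧ ∀ l < j, tokens.getD (i - j + l) "" = parts.getD l "" := by
                      have := (hinv j).mp hjmem
                      exact ⟨this.1, this.2.1, this.2.2.1, this.2.2.2⟩
                    have hjn : j + 1 ≠ n := hnomatch' j hjmem |> fun h => by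
                      intro he; exact h ⟨hjm', he⟩
                    refine ⟨by omega, by omega, by omega, ?_⟩
                    intro l hl
                    by_cases hlj : l = j
                    · subst hlj
                      have : i + 1 - (l + 1) + l = i := by omega
                      rw [this, htokD, hjm']
                    · have : i + 1 - (j + 1) + l = i - j + l := by omega
                      rw [this]
                      exact hM l (by omega)
                  · have : j' = 1 := by simpa using hj'
                    subst this
                    refine ⟨le_rfl, by omega, by omega, ?_⟩
                    intro l hl
                    have : l = 0 := by omega
                    subst this
                    have : i + 1 - 1 + 0 = i := by omega
                    rw [this, htokD, h0']
                · rintro ⟨hj1', hjlt, hjle, hM⟩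
                  rcases Nat.eq_or_lt_of_le hj1' with rfl | hj2
                  · exact List.mem_append.mpr (Or.inr (by simp))
                  · refine List.mem_append.mpr (Or.inl ?_)
                    simp only [List.mem_map, List.mem_filter]
                    refine ⟨j' - 1, ⟨?_, ?_⟩, by omega⟩
                    · apply (hinv (j' - 1)).mpr
                      refine ⟨by omega, by omega, by omega, ?_⟩
                      intro l hl
                      have : i - (j' - 1) + l = i + 1 - j' + l := by omega
                      rw [this]
                      exact hM l (by omega)
                    · have := hM (j' - 1) (by omega)
                      have heq : i + 1 - j' + (j' - 1) = i := by omega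
                      rw [heq, htokD] at this
                      simpa using this.symm
          · have h0' : parts.getD 0 "" ≠ tok := by simpa using h0
            simp only [h0, Bool.false_eq_true, if_false]
            rw [ih (i + 1) _ (by omega) (by omega) ?_]
            · constructor
              · rintro ⟨k, hk, hw⟩; exact ⟨k, by omega, hw⟩
              · rintro ⟨k, hk, hw⟩
                refine ⟨k, ?_, hw⟩
                rcases Nat.lt_or_ge (i + 1) (k + n) with h | h
                · exact h
                · exfalso
                  have hke : k + n = i + 1 := by omega
                  obtain ⟨hb, hpt⟩ := (pvWindow_iff tokens parts k hp).mp hw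
                  by_cases hn1 : n = 1
                  · apply h0'
                    have := hpt 0 (by omega)
                    have heq : k + 0 = i := by omega
                    rw [heq, htokD] at this
                    exact this.symm
                  · have hn2 : 2 ≤ n := by omega
                    apply hnomatch' (n - 1) ?_ ⟨?_, by omega⟩
                    · apply (hinv (n - 1)).mpr
                      refine ⟨by omega, by omega, by omega, ?_⟩
                      intro l hl
                      have : i - (n - 1) + l = k + l := by omega
                      rw [this]
                      exact hpt l (by omega)
                    · have := hpt (n - 1) (by omega)
                      have heq : k + (n - 1) = i := by omega
                      rw [heq, htokD] at this
                      exact this.symm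
            · -- invariant at i+1 for nxt (no new length-1 match: parts[0] ≠ tok)
              intro j'
              constructor
              · intro hj'
                simp only [List.mem_map, List.mem_filter] at hj'
                rcases hj' with ⟨j, ⟨hjmem, hjm⟩, rfl⟩
                have hjm' : parts.getD j "" = tok := by simpa using hjm
                obtain ⟨hj1', hjlt, hjle, hM⟩ :
                    1 ≤ j ∧ j < n ∧ j ≤ i ∧ ∀ l < j, tokens.getD (i - j + l) "" = parts.getD l "" := by
                  have := (hinv j).mp hjmem
                  exact ⟨this.1, this.2.1, this.2.2.1, this.2.2.2⟩
                have hjn : j + 1 ≠ n := by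
                  intro he; exact hnomatch' j hjmem ⟨hjm', he⟩
                refine ⟨by omega, by omega, by omega, ?_⟩
                intro l hl
                by_cases hlj : l = j
                · subst hlj
                  have : i + 1 - (l + 1) + l = i := by omega
                  rw [this, htokD, hjm']
                · have : i + 1 - (j + 1) + l = i - j + l := by omega
                  rw [this]
                  exact hM l (by omega)
              · rintro ⟨hj1', hjlt, hjle, hM⟩
                rcases Nat.eq_or_lt_of_le hj1' with rfl | hj2
                · exfalso
                  have := hM 0 (by omega)
                  have heq : i + 1 - 1 + 0 = i := by omega
                  rw [heq, htokD] at this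
                  exact h0' this.symm
                · simp only [List.mem_map, List.mem_filter]
                  refine ⟨j' - 1, ⟨?_, ?_⟩, by omega⟩
                  · apply (hinv (j' - 1)).mpr
                    refine ⟨by omega, by omega, by omega, ?_⟩
                    intro l hl
                    have : i - (j' - 1) + l = i + 1 - j' + l := by omega
                    rw [this]
                    exact hM l (by omega)
                  · have := hM (j' - 1) (by omega)
                    have heq : i + 1 - j' + (j' - 1) = i := by omega
                    rw [heq, htokD] at this
                    simpa using this.symm

-- ===== VERDICT (by name: the statement is the Claim_ definition above) =====
theorem keyword_in_document_spec : Claim_equal_keyword_in_document := by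
  intro keyword tokens _
  unfold Spec_keyword_in_document
  show keyword_in_document keyword tokens = _
  simp only [keyword_in_document, keyword_in_document_alt, pvFilter_id]
  generalize PySem.Str.split₀ (PySem.Str.lower keyword) = parts
  by_cases hE : parts.isEmpty
  · simp [hE]
  · have hp : parts ≠ [] := by simpa [List.isEmpty_iff] using hE
    have hn : 0 < parts.length := List.length_pos_iff.mpr hp
    simp only [hE, if_false, Bool.false_eq_true]
    apply Bool.coe_iff_coe.mp
    rw [show tokens = tokens.drop 0 from rfl] 
    rw [pvLoop_iff tokens parts hp (tokens.length) 0 [] (by omega) (by omega) ?_]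
    · rw [List.drop_zero]
      by_cases h1 : parts.length == 1
      · have h1' : parts.length = 1 := by simpa using h1
        rcases List.length_eq_one_iff.mp h1' with ⟨a, rfl⟩
        simp only [h1, if_true]
        rw [pvA_single_iff]
        constructor
        · rintro ⟨k, hk⟩; exact ⟨k, by omega, hk⟩
        · rintro ⟨k, _, hk⟩; exact ⟨k, hk⟩
      · simp only [h1, Bool.false_eq_true, if_false]
        rw [pvA_range_iff tokens parts hp]
        constructor
        · rintro ⟨k, hk⟩; exact ⟨k, by omega, hk⟩
        · rintro ⟨k, _, hk⟩; exact ⟨k, hk⟩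
    · intro j
      simp only [List.not_mem_nil, false_iff]
      rintro ⟨hj1, hjlt, hjle, _⟩
      omega
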